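-- pv_equiv track=rewrite | github.com/vlz0/LeetCode | 2. Medium/0078. Subsets.py | ayuda
-- ===== SOURCE A (Python) =====
-- def ayuda(i, nums, j, respuesta):
--       if i == len(nums):
--           if j not in respuesta:
--               respuesta.append(j)
--           return
--       ayuda(i + 1, nums, j + [nums[i]], respuesta)
--       ayuda(i + 1, nums, j, respuesta)
--       return respuesta
-- ===== SOURCE B (Python) =====
-- def ayuda(i, nums, j, respuesta):
--     m = len(nums) - i
--     rem = [nums[k] for k in range(i, len(nums))]
--     for mask in reversed(range(2 ** m)):
--         subset = j + [rem[k] for k in range(m) if (mask >> (m - 1 - k)) & 1]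
--         if subset not in respuesta:
--             respuesta.append(subset)
--     return respuesta
-- ===== Notes on version B (the rewrite author's own statement) =====
-- stated objective: alternative
-- what changed: Replaced the recursive include/exclude backtracking with an iterative descending-bitmask enumeration over the remaining elements (MSB = first element), dedup-appending each subset; same exponential cost, no recursion.
-- outside the precondition, e.g. on ayuda(0, [], [], []): A returns None, B returns [[]]
import Mathlib
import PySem

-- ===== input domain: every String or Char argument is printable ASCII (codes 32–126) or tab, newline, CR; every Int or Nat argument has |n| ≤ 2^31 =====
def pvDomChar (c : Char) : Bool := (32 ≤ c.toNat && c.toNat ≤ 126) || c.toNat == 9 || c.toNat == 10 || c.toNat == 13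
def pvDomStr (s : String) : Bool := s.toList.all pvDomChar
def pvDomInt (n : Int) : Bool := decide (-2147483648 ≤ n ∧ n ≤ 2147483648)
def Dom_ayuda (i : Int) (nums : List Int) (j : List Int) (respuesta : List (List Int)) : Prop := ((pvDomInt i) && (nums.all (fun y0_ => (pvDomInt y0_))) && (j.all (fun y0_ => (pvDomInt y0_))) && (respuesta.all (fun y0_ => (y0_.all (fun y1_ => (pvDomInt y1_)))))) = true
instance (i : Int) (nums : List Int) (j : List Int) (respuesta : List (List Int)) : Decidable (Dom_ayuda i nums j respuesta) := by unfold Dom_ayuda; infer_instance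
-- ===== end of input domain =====

-- B replaces A's recursive include/exclude backtracking by an iterative descending-bitmask
-- enumeration of the remaining elements (same values, same order, same dedup-append mutation
-- of respuesta); objective: alternative algorithm, same asymptotic cost.
-- Both Pythons mutate `respuesta` in place in the same way; the theorems are about the return value.


-- ===== PORT A =====
-- literal port of A's recursion (structural recursion on a fuel counter that merely makes the
-- totality explicit: fuel = remaining recursion depth + 1, never exhausted on the calls made);
-- the `none` branch is Python's IndexError (excluded by Pre_), and at the leaf Python returns
-- None (excluded by Pre_): the port returns the mutated list there.
def ayudaGo (fuel : Nat) (i : Int) (nums : List Int) (j : List Int) (respuesta : List (List Int)) : List (List Int) :=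
  match fuel with
  | 0 => respuesta
  | fuel + 1 =>
    if i = (nums.length : Int) then
      (if respuesta.contains j then respuesta else respuesta ++ [j])
    else
      match PySem.List.pyGet? nums i with
      | none => respuesta
      | some x =>
          ayudaGo fuel (i + 1) nums j (ayudaGo fuel (i + 1) nums (j ++ [x]) respuesta)

def ayuda (i : Int) (nums : List Int) (j : List Int) (respuesta : List (List Int)) : List (List Int) :=
  ayudaGo (((nums.length : Int) - i).toNat + 1) i nums j respuesta

-- ===== PORT B =====
-- literal port of Source B; the `none` branch is the IndexError of the comprehension
-- `[nums[k] for k in range(i, len(nums))]` (excluded by Pre_).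
def ayuda_alt (i : Int) (nums : List Int) (j : List Int) (respuesta : List (List Int)) : List (List Int) :=
  let m : Int := (nums.length : Int) - i
  match (PySem.List.pyRange i (nums.length : Int) 1).mapM (fun k => PySem.List.pyGet? nums k) with
  | none => respuesta
  | some rem =>
      let mn : Nat := m.toNat
      ((List.range (2 ^ mn)).reverse).foldl
        (fun resp mask =>
          let subset := j ++ (List.range mn).filterMap
            (fun k => if Nat.testBit mask (mn - 1 - k) then some (rem.getD k 0) else none)
          if resp.contains subset then resp else resp ++ [subset])
        respuesta

-- ===== PRECONDITION & SPEC =====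
-- Pre_ excludes i = len(nums), where A's bare leaf return yields None (not a list), and
-- i outside [-len(nums), len(nums)) where A raises (IndexError for i > len via nums[i],
-- IndexError for i < -len via negative indexing).
def Pre_ayuda (i : Int) (nums : List Int) (j : List Int) (respuesta : List (List Int)) : Prop :=
  -(nums.length : Int) ≤ i ∧ i < (nums.length : Int)
instance (i : Int) (nums : List Int) (j : List Int) (respuesta : List (List Int)) : Decidable (Pre_ayuda i nums j respuesta) := by unfold Pre_ayuda; infer_instance
def pvWitness_ayuda : Int × List Int × List Int × List (List Int) := (0, [1, 2], [], [])

def Spec_ayuda (i : Int) (nums : List Int) (j : List Int) (respuesta : List (List Int)) (out : List (List Int)) : Prop := out = ayuda_alt i nums j respuesta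
instance (i : Int) (nums : List Int) (j : List Int) (respuesta : List (List Int)) (out : List (List Int)) : Decidable (Spec_ayuda i nums j respuesta out) := by unfold Spec_ayuda; infer_instance

-- ===== CLAIM (what is proved, stated in full; the proofs are below) =====
def Claim_equal_ayuda : Prop := ∀ (i : Int) (nums : List Int) (j : List Int) (respuesta : List (List Int)), Dom_ayuda i nums j respuesta → Pre_ayuda i nums j respuesta → Spec_ayuda i nums j respuesta (ayuda i nums j respuesta)

-- ===== LEMMAS AND PROOFS =====

-- dedup-append: `if subset not in respuesta: respuesta.append(subset)`
def dApp (r : List (List Int)) (s : List Int) : List (List Int) :=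
  if r.contains s then r else r ++ [s]

-- the subset sequence A's include-first DFS emits over remaining elements `rem`
def cands : List Int → List (List Int)
  | [] => [[]]
  | x :: rs => (cands rs).map (x :: ·) ++ cands rs

-- the subset B builds from a bitmask
def sel (m : Nat) (ys : List Int) (mask : Nat) : List Int :=
  (List.range m).filterMap (fun k => if Nat.testBit mask (m - 1 - k) then some (ys.getD k 0) else none)

-- the remaining elements nums[i:], as B's comprehension computes them
def remOf (nums : List Int) (i : Int) : List Int :=
  (PySem.List.pyRange i (nums.length : Int) 1).map (fun k => (PySem.List.pyGet? nums k).getD 0)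

theorem sel_succ_high (m : Nat) (x : Int) (rs : List Int) (mask : Nat) (h : mask < 2 ^ m) :
    sel (m + 1) (x :: rs) (2 ^ m + mask) = x :: sel m rs mask := by
  unfold sel
  rw [List.range_succ_eq_map]
  rw [List.filterMap_cons, List.filterMap_map]
  have hb : Nat.testBit (2 ^ m + mask) m = true := by
    rw [Nat.testBit_two_pow_add_eq, Nat.testBit_lt_two_pow h]; rfl
  simp only [Nat.add_sub_cancel, Nat.sub_zero, hb, if_pos]
  simp only [List.getD_cons_zero]
  congr 1
  apply List.filterMap_congr
  intro k hk
  have hk' : k < m := List.mem_range.mp hk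
  have h1 : m - (k + 1) = m - 1 - k := by omega
  have h2 : m - 1 - k < m := by omega
  simp only [Function.comp, Nat.succ_eq_add_one, List.getD_cons_succ]
  rw [h1, Nat.testBit_two_pow_add_gt h2]

theorem sel_succ_low (m : Nat) (x : Int) (rs : List Int) (mask : Nat) (h : mask < 2 ^ m) :
    sel (m + 1) (x :: rs) mask = sel m rs mask := by
  unfold sel
  rw [List.range_succ_eq_map]
  rw [List.filterMap_cons, List.filterMap_map]
  have hb : Nat.testBit mask m = false := Nat.testBit_lt_two_pow h
  simp only [Nat.add_sub_cancel, Nat.sub_zero, hb, Bool.false_eq_true, if_false]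
  apply List.filterMap_congr
  intro k hk
  have hk' : k < m := List.mem_range.mp hk
  have h1 : m - (k + 1) = m - 1 - k := by omega
  simp only [Function.comp, Nat.succ_eq_add_one, List.getD_cons_succ]
  rw [h1]

-- B's descending-mask sequence of subsets is exactly A's DFS sequence
theorem seq_eq (ys : List Int) :
    ((List.range (2 ^ ys.length)).reverse).map (sel ys.length ys) = cands ys := by
  induction ys with
  | nil => rfl
  | cons x rs ih =>
    have hp : 2 ^ (x :: rs).length = 2 ^ rs.length + 2 ^ rs.length := by
      simp [List.length_cons, pow_succ, Nat.mul_two]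
    rw [hp, List.range_add, List.reverse_append, List.map_append, List.map_reverse,
      List.map_map, List.map_reverse]
    have hhigh : (List.range (2 ^ rs.length)).map ((sel (x :: rs).length (x :: rs)) ∘ (fun k => 2 ^ rs.length + k))
        = (List.range (2 ^ rs.length)).map (fun mask => x :: sel rs.length rs mask) := by
      apply List.map_congr_left
      intro mask hm
      simp only [Function.comp]
      exact sel_succ_high rs.length x rs mask (List.mem_range.mp hm)
    have hlow : (List.range (2 ^ rs.length)).map (sel (x :: rs).length (x :: rs))
        = (List.range (2 ^ rs.length)).map (sel rs.length rs) := by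
      apply List.map_congr_left
      intro mask hm
      exact sel_succ_low rs.length x rs mask (List.mem_range.mp hm)
    rw [hhigh, hlow]
    show ((List.range (2 ^ rs.length)).map (fun mask => x :: sel rs.length rs mask)).reverse
        ++ ((List.range (2 ^ rs.length)).map (sel rs.length rs)).reverse = cands (x :: rs)
    have : (List.range (2 ^ rs.length)).map (fun mask => x :: sel rs.length rs mask)
        = ((List.range (2 ^ rs.length)).map (sel rs.length rs)).map (x :: ·) := by
      rw [List.map_map]; rfl
    rw [this, ← List.map_reverse, ← List.map_reverse, ih]
    rfl

-- remOf unfolds one step while i < len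
theorem remOf_cons (nums : List Int) (i : Int) (x : Int)
    (hx : PySem.List.pyGet? nums i = some x) (hlt : i < (nums.length : Int)) :
    remOf nums i = x :: remOf nums (i + 1) := by
  unfold remOf
  rw [PySem.List.pyRange_one_cons hlt, List.map_cons, hx]
  rfl

theorem remOf_nil (nums : List Int) (i : Int) (h : (nums.length : Int) ≤ i) :
    remOf nums i = [] := by
  unfold remOf
  rw [PySem.List.pyRange_one_eq_nil h]
  rfl

-- characterisation of A: fold the DFS subset sequence through dedup-append
theorem ayudaGo_eq_foldl (nums : List Int) :
    ∀ (fuel : Nat) (i : Int) (j : List Int) (resp : List (List Int)),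
      -(nums.length : Int) ≤ i → i ≤ (nums.length : Int) →
      ((nums.length : Int) - i).toNat < fuel →
      ayudaGo fuel i nums j resp = ((cands (remOf nums i)).map (j ++ ·)).foldl dApp resp := by
  intro fuel
  induction fuel with
  | zero => intro i j resp _ _ hf; omega
  | succ fuel ih =>
    intro i j resp hlb hle hf
    by_cases hi : i = (nums.length : Int)
    · rw [ayudaGo, if_pos hi, remOf_nil nums i (le_of_eq hi.symm)]
      simp [cands, dApp]
    · have hlt : i < (nums.length : Int) := lt_of_le_of_ne hle hi
      have hin : PySem.Raise.InRange nums.length i := ⟨hlb, hlt⟩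
      rw [ayudaGo, if_neg hi]
      split
      · next hnone => exact absurd ((PySem.List.pyGet?_eq_none_iff nums i).mp hnone) (not_not.mpr hin)
      · next x hx =>
        rw [ih (i + 1) (j ++ [x]) resp (by omega) (by omega) (by omega)]
        rw [ih (i + 1) j _ (by omega) (by omega) (by omega)]
        rw [remOf_cons nums i x hx hlt]
        rw [show cands (x :: remOf nums (i + 1))
            = (cands (remOf nums (i + 1))).map (x :: ·) ++ cands (remOf nums (i + 1)) from rfl]
        rw [List.map_append, List.foldl_append, List.map_map]
        congr 1
        congr 1
        apply List.map_congr_left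
        intro c _
        simp [Function.comp]

-- the mapM in B succeeds under Pre_ and yields remOf
theorem mapM_pyGet?_eq (nums : List Int) (l : List Int)
    (h : ∀ k ∈ l, (PySem.List.pyGet? nums k).isSome) :
    l.mapM (fun k => PySem.List.pyGet? nums k)
      = some (l.map (fun k => (PySem.List.pyGet? nums k).getD 0)) := by
  induction l with
  | nil => rfl
  | cons a l ih =>
    obtain ⟨x, hx⟩ := Option.isSome_iff_exists.mp (h a (List.mem_cons_self ..))
    rw [List.mapM_cons, hx, ih (fun k hk => h k (List.mem_cons_of_mem a hk))]
    simp [hx]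

-- characterisation of B: the same fold
theorem ayuda_alt_eq_foldl (i : Int) (nums : List Int) (j : List Int) (resp : List (List Int))
    (hlb : -(nums.length : Int) ≤ i) (hlt : i < (nums.length : Int)) :
    ayuda_alt i nums j resp = ((cands (remOf nums i)).map (j ++ ·)).foldl dApp resp := by
  unfold ayuda_alt
  have hmapM : (PySem.List.pyRange i (nums.length : Int) 1).mapM (fun k => PySem.List.pyGet? nums k)
      = some (remOf nums i) := by
    apply mapM_pyGet?_eq
    intro k hk
    have hk' := (PySem.List.mem_pyRange_one).mp hk
    rcases hg : PySem.List.pyGet? nums k with _ | x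
    · exact absurd ((PySem.List.pyGet?_eq_none_iff nums k).mp hg) (not_not.mpr ⟨by omega, hk'.2⟩)
    · rfl
  rw [hmapM]
  simp only
  have hlen : (remOf nums i).length = ((nums.length : Int) - i).toNat := by
    unfold remOf
    rw [List.length_map, PySem.List.length_pyRange_one]
  rw [show (((nums.length : Int) - i).toNat) = (remOf nums i).length from hlen.symm]
  rw [show (fun (resp : List (List Int)) (mask : Nat) =>
        let subset := j ++ (List.range (remOf nums i).length).filterMap
          (fun k => if Nat.testBit mask ((remOf nums i).length - 1 - k) then some ((remOf nums i).getD k 0) else none)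
        if resp.contains subset then resp else resp ++ [subset])
      = (fun resp mask => dApp resp (j ++ sel (remOf nums i).length (remOf nums i) mask)) from rfl]
  rw [← List.foldl_map (f := fun mask => j ++ sel (remOf nums i).length (remOf nums i) mask) (g := dApp)]
  rw [show ((List.range (2 ^ (remOf nums i).length)).reverse).map
        (fun mask => j ++ sel (remOf nums i).length (remOf nums i) mask)
      = (((List.range (2 ^ (remOf nums i).length)).reverse).map (sel (remOf nums i).length (remOf nums i))).map (j ++ ·) from by
    rw [List.map_map]; rfl]
  rw [seq_eq]

-- ===== VERDICT (by name: the statement is the Claim_ definition above) =====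
theorem ayuda_spec : Claim_equal_ayuda := by
  intro i nums j resp _ hpre
  unfold Spec_ayuda
  rw [show ayuda i nums j resp = ayudaGo (((nums.length : Int) - i).toNat + 1) i nums j resp from rfl]
  rw [ayudaGo_eq_foldl nums _ i j resp hpre.1 (le_of_lt hpre.2) (by omega)]
  rw [ayuda_alt_eq_foldl i nums j resp hpre.1 hpre.2]
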